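-- pv_equiv track=rewrite | github.com/francisjrs/openclaw-backup | scripts/redacted_backup.py | rel_excluded
-- ===== SOURCE A (Python) =====
-- EXCLUDE_DIRS = {'.git', 'node_modules', 'state/backup_scrubbed'}
--
-- EXCLUDE_FILES = {
--     '.secrets/icloud_app_password',
-- }
--
-- def rel_excluded(rel: str) -> bool:
--     rel = rel.strip('/')
--     if rel in EXCLUDE_FILES:
--         return True
--     for ex in EXCLUDE_DIRS:
--         if rel == ex or rel.startswith(ex + '/'):
--             return True
--     return False
-- ===== SOURCE B (Python) =====
-- EXCLUDE_DIRS = {'.git', 'node_modules', 'state/backup_scrubbed'}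
--
-- EXCLUDE_FILES = {
--     '.secrets/icloud_app_password',
-- }
--
-- def rel_excluded(rel: str) -> bool:
--     rel = rel.strip('/')
--     if rel in EXCLUDE_FILES or rel in EXCLUDE_DIRS:
--         return True
--     # scan rel once: every slash position yields an ancestor prefix rel[:i];
--     # excluded iff some ancestor is an excluded directory
--     return any(rel[i] == '/' and rel[:i] in EXCLUDE_DIRS for i in range(len(rel)))
-- ===== Notes on version B (the rewrite author's own statement) =====
-- stated objective: alternative
-- what changed: Instead of looping over EXCLUDE_DIRS and testing equality or a slash-terminated startswith per directory, B scans the stripped path once: it checks the path itself for membership and then, at each slash position i, tests whether the ancestor prefix rel[:i] is in EXCLUDE_DIRS (set lookups replace the per-directory prefix scan).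
import Mathlib
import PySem

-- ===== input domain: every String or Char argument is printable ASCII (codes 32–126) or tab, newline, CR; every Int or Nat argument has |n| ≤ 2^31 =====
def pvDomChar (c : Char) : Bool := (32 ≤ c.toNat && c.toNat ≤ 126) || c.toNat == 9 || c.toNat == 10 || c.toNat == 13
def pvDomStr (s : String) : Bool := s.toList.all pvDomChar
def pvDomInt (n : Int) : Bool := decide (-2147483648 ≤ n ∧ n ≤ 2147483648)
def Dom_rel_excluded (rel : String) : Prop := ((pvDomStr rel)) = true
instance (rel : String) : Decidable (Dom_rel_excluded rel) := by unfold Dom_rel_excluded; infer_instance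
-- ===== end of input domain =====

-- B replaces the loop over EXCLUDE_DIRS (equality-or-startswith per directory) by a single scan of
-- rel's slash positions, testing each ancestor prefix for set membership (objective: alternative).

-- ===== PORT A =====
def pvExcludeDirs : PySem.Set (List Char) :=
  PySem.Set.ofList [".git".toList, "node_modules".toList, "state/backup_scrubbed".toList]

def pvExcludeFiles : PySem.Set (List Char) :=
  PySem.Set.ofList [".secrets/icloud_app_password".toList]

-- loop over the set, returning True on the first hit = List.any (result is order-independent)
def rel_excluded (rel : String) : Bool :=
  let r := (PySem.Str.stripChars rel "/").toList
  if PySem.Set.contains pvExcludeFiles r then true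
  else pvExcludeDirs.any (fun ex => r == ex || PySem.Chars.startswith r (ex ++ ['/']))

-- ===== PORT B =====
def rel_excluded_alt (rel : String) : Bool :=
  let r := (PySem.Str.stripChars rel "/").toList
  if PySem.Set.contains pvExcludeFiles r || PySem.Set.contains pvExcludeDirs r then true
  else (PySem.List.pyRange 0 (r.length : Int) 1).any
    (fun i => (PySem.List.pyGet? r i == some '/') &&
      PySem.Set.contains pvExcludeDirs (PySem.List.slice r none (some i)))

-- ===== PRECONDITION & SPEC =====
def Spec_rel_excluded (rel : String) (out : Bool) : Prop := out = rel_excluded_alt rel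
instance (rel : String) (out : Bool) : Decidable (Spec_rel_excluded rel out) := by unfold Spec_rel_excluded; infer_instance

-- ===== CLAIM (what is proved, stated in full; the proofs are below) =====
def Claim_equal_rel_excluded : Prop := ∀ (rel : String), Dom_rel_excluded rel → Spec_rel_excluded rel (rel_excluded rel)

-- ===== LEMMAS AND PROOFS =====

-- a directory prefix match at a '/' boundary ↔ some slash position i with r[:i] = p
theorem pv_startswith_slash_iff (r p : List Char) :
    PySem.Chars.startswith r (p ++ ['/']) = true ↔
      ∃ i : Nat, i < r.length ∧ r[i]? = some '/' ∧ r.take i = p := by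
  rw [PySem.Chars.startswith_iff]
  constructor
  · rintro ⟨t, ht⟩
    refine ⟨p.length, ?_, ?_, ?_⟩ <;> subst ht <;> simp
  · rintro ⟨i, hi, hget, htake⟩
    have h1 : r.take (i + 1) = p ++ ['/'] := by
      rw [List.take_add_one, htake, hget]; rfl
    exact h1 ▸ List.take_prefix (i + 1) r

theorem pv_core (r : List Char) :
    (if PySem.Set.contains pvExcludeFiles r then true
     else pvExcludeDirs.any (fun ex => r == ex || PySem.Chars.startswith r (ex ++ ['/']))) =
    (if PySem.Set.contains pvExcludeFiles r || PySem.Set.contains pvExcludeDirs r then true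
     else (PySem.List.pyRange 0 (r.length : Int) 1).any
       (fun i => (PySem.List.pyGet? r i == some '/') &&
         PySem.Set.contains pvExcludeDirs (PySem.List.slice r none (some i)))) := by
  by_cases hf : PySem.Set.contains pvExcludeFiles r = true
  · rw [if_pos hf, if_pos (by rw [hf, Bool.true_or])]
  · rw [if_neg hf]
    by_cases hd : PySem.Set.contains pvExcludeDirs r = true
    · rw [if_pos (by rw [hd, Bool.or_true]), List.any_eq_true]
      exact ⟨r, (PySem.Set.contains_iff _ _).mp hd, by simp⟩
    · rw [if_neg (by simp only [Bool.or_eq_true, hf, hd, or_self, Bool.false_eq_true, not_false_eq_true])]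
      rw [Bool.eq_iff_iff]
      simp only [List.any_eq_true, Bool.or_eq_true, Bool.and_eq_true, beq_iff_eq,
        PySem.List.mem_pyRange_one, PySem.Set.contains_iff]
      constructor
      · rintro ⟨ex, hex, h | h⟩
        · exact absurd ((PySem.Set.contains_iff _ _).mpr (h ▸ hex)) hd
        · obtain ⟨i, hi, hget, htake⟩ := (pv_startswith_slash_iff r ex).mp h
          refine ⟨(i : Int), ⟨by positivity, by exact_mod_cast hi⟩, ?_, ?_⟩
          · rw [PySem.List.pyGet?_natCast]; exact hget
          · rw [PySem.List.slice_to_natCast, htake]; exact hex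
      · rintro ⟨i, ⟨h0, hlt⟩, hget, hmem⟩
        refine ⟨PySem.List.slice r none (some i), hmem, Or.inr ?_⟩
        apply (pv_startswith_slash_iff r _).mpr
        refine ⟨i.toNat, by omega, ?_, ?_⟩
        · rw [← hget, ← PySem.List.pyGet?_natCast, Int.toNat_of_nonneg h0]
        · exact (PySem.List.slice_to _ h0).symm

-- ===== VERDICT (by name: the statement is the Claim_ definition above) =====
theorem rel_excluded_spec : Claim_equal_rel_excluded := by
  intro rel _
  unfold Spec_rel_excluded rel_excluded rel_excluded_alt
  exact pv_core _
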